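-- pv_equiv track=rewrite | github.com/zykogithub/projets_du_lyc-e | term/periode_3/exercice_21_janvier.py | gagnants
-- ===== SOURCE A (Python) =====
-- def scores_aimes(votes):
--     """
--     Renvoie le dictionnaire dont les clés sont les personnes,
--     et les valeurs le nombre de personnes qui leur ont attribué des J'aime.
--     """
--     liste=[]
--     for valeur in votes.values():
--         liste+=valeur
--     dico_jaime={}
--     for cle,valeur in votes.items():
--         dico_jaime[cle]=liste.count(cle)
--     return dico_jaime
--
-- def gagnants(votes):
--     """
--     Renvoie la liste des personnes ayant le plus reçu de : J'aime
--     """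
--     dico_jaime=scores_aimes(votes)
--     stockage=[]
--     for valeur in dico_jaime.values():
--         stockage.append(valeur)
--     stockage.sort()
--     gagnant=[]
--     for cle in dico_jaime.keys():
--         if dico_jaime[cle]==stockage[-1]:
--             gagnant.append(cle)
--     return gagnant
-- ===== SOURCE B (Python) =====
-- def gagnants(votes):
--     """
--     Renvoie la liste des personnes ayant le plus reçu de : J'aime
--     """
--     counts = {}
--     for valeurs in votes.values():
--         for p in valeurs:
--             counts[p] = counts.get(p, 0) + 1
--     buckets = {}
--     for cle in votes:
--         buckets.setdefault(counts.get(cle, 0), []).append(cle)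
--     return buckets[sorted(buckets)[-1]]
-- ===== Notes on version B (the rewrite author's own statement) =====
-- stated objective: faster
-- what changed: Replaces A's concatenate-all-values + per-key list.count + sort-all-scores + filter scan with a single counting pass over the values followed by a group-by-score bucket index, returning the top bucket directly.
-- outside the precondition, e.g. on gagnants({}): A returns [], B raises IndexError
import Mathlib
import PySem

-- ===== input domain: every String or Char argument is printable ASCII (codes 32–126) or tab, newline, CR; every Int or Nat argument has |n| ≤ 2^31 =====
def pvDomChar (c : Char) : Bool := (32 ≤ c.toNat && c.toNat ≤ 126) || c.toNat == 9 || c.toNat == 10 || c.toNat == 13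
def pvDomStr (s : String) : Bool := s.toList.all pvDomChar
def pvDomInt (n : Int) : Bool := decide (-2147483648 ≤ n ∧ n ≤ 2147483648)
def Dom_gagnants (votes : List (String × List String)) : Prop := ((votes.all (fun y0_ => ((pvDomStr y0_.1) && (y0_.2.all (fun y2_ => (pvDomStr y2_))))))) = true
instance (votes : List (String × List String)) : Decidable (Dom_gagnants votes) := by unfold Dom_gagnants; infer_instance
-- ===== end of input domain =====

-- B replaces A's concatenate-all + per-key list.count + sort-all-scores + filter scan by one
-- counting pass over the values and a group-by-score bucket index whose top bucket is the answer.

-- ===== PORT A =====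
def pvScoresAimes (votes : List (String × List String)) : PySem.Dict String Int :=
  let liste := votes.foldl (fun l p => l ++ p.2) []
  votes.foldl (fun d p => d.insert p.1 ((PySem.List.count liste p.1 : Int))) PySem.Dict.empty

def gagnants (votes : List (String × List String)) : List String :=
  let dico := pvScoresAimes votes
  let stockage := dico.values.foldl (fun s v => s ++ [v]) []
  let st := PySem.List.sorted stockage (fun x => x) false
  -- stockage[-1] is evaluated inside the key loop: with an empty dict the loop body never
  -- runs and Python returns []; the `none` branch is exactly that case.
  match PySem.List.pyGet? st (-1) with
  | none => []
  | some top =>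
      -- dico_jaime[cle]: cle is always a key of dico, so the lookup never raises; getD is exact here
      dico.keys.foldl (fun g k => if dico.getD k 0 == top then g ++ [k] else g) []

-- ===== PORT B =====
def gagnants_alt (votes : List (String × List String)) : List String :=
  let counts : PySem.Dict String Int :=
    votes.foldl (fun c p => p.2.foldl (fun c q => c.insert q (c.getD q 0 + 1)) c) PySem.Dict.empty
  let buckets : PySem.Dict Int (List String) :=
    -- setdefault(score, []).append(cle) = modify score [] (· ++ [cle])
    votes.foldl (fun b p => b.modify (counts.getD p.1 0) [] (fun l => l ++ [p.1])) PySem.Dict.empty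
  match PySem.List.pyGet? (PySem.List.sorted buckets.keys (fun x => x) false) (-1) with
  | none => []  -- IndexError on the empty dict; excluded by Pre_gagnants
  | some top => buckets.getD top []  -- top is a key of buckets, lookup never raises

-- ===== PRECONDITION & SPEC =====
-- Pre_ excludes the empty dict, on which B's sorted(buckets)[-1] raises IndexError while A
-- returns []; it also excludes association lists with duplicate keys, which do not represent
-- a Python dict (A's argument is a dict, so such inputs never arise).
def Pre_gagnants (votes : List (String × List String)) : Prop :=
  votes ≠ [] ∧ (votes.map Prod.fst).Nodup
instance (votes : List (String × List String)) : Decidable (Pre_gagnants votes) := by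
  unfold Pre_gagnants; infer_instance
def pvWitness_gagnants : (List (String × List String)) :=
  [("a", ["b", "a"]), ("b", ["a"])]

def Spec_gagnants (votes : List (String × List String)) (out : List String) : Prop := out = gagnants_alt votes
instance (votes : List (String × List String)) (out : List String) : Decidable (Spec_gagnants votes out) := by unfold Spec_gagnants; infer_instance

-- ===== CLAIM (what is proved, stated in full; the proofs are below) =====
def Claim_equal_gagnants : Prop := ∀ (votes : List (String × List String)), Dom_gagnants votes → Pre_gagnants votes → Spec_gagnants votes (gagnants votes)

-- ===== LEMMAS AND PROOFS =====

def pvScore (votes : List (String × List String)) (k : String) : Int :=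
  ((votes.flatMap (fun p => p.2)).count k : Int)
lemma pvLe_getLast (s : List Int) (h : s.Pairwise (· ≤ ·)) (hs : s ≠ []) : ∀ y ∈ s, y ≤ s.getLast hs := by
  induction s with
  | nil => simp at hs
  | cons a t ih =>
      intro y hy
      rcases List.pairwise_cons.mp h with ⟨ha, ht⟩
      cases t with
      | nil => simp at hy; simp [hy, List.getLast]
      | cons b t' =>
          rw [List.getLast_cons (by simp)]
          rcases List.mem_cons.mp hy with rfl | hy'
          · exact ha _ (List.getLast_mem _)
          · exact ih ht (by simp) _ hy'
lemma pvLastSorted (xs : List Int) (hx : xs ≠ []) :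
    ∃ m, PySem.List.pyGet? (PySem.List.sorted xs (fun x => x) false) (-1) = some m ∧
      m ∈ xs ∧ ∀ y ∈ xs, y ≤ m := by
  set s := PySem.List.sorted xs (fun x => x) false with hsdef
  have hs : s ≠ [] := by rw [hsdef, ne_eq, PySem.List.sorted_eq_nil_iff]; exact hx
  have hperm := PySem.List.sorted_perm xs (fun x => x) false
  have hpw : s.Pairwise (· ≤ ·) := PySem.List.sorted_pairwise xs (fun x => x)
  refine ⟨s.getLast hs, ?_, ?_, ?_⟩
  · conv_lhs => rw [← List.dropLast_append_getLast hs]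
    simp [PySem.List.pyGet?, PySem.List.pyIdx?]
  · exact hperm.mem_iff.mp (List.getLast_mem hs)
  · intro y hy
    exact pvLe_getLast s hpw hs y (hperm.mem_iff.mpr hy)
lemma pvCountsFold (votes : List (String × List String)) (c : PySem.Dict String Int) (q : String) :
    (votes.foldl (fun c p => p.2.foldl (fun c q => c.insert q (c.getD q 0 + 1)) c) c).getD q 0
      = c.getD q 0 + ((votes.flatMap (fun p => p.2)).count q : Int) := by
  induction votes generalizing c with
  | nil => simp
  | cons p t ih =>
      simp only [List.foldl_cons, List.flatMap_cons, List.count_append, ih,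
        PySem.Dict.getD_foldl_insert_add_one]
      push_cast; ring
lemma pvItemsA (votes : List (String × List String)) (hnd : (votes.map Prod.fst).Nodup) :
    (pvScoresAimes votes).items = votes.map (fun p => (p.1, pvScore votes p.1)) := by
  unfold pvScoresAimes
  rw [PySem.Dict.items_foldl_insert_fresh votes Prod.fst _ _ (fun a _ => PySem.Dict.contains_empty _) hnd]
  simp [pvScore, PySem.List.count, List.flatMap_def, PySem.Dict.empty]

theorem pv_main (votes : List (String × List String)) (hne : votes ≠ [])
    (hnd : (votes.map Prod.fst).Nodup) : gagnants votes = gagnants_alt votes := by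
  have hitems := pvItemsA votes hnd
  have hkeys : (pvScoresAimes votes).keys = votes.map Prod.fst := by
    show (pvScoresAimes votes).items.map _ = _
    rw [hitems]; simp
  have hvals : (pvScoresAimes votes).values = votes.map (fun p => pvScore votes p.1) := by
    show (pvScoresAimes votes).items.map _ = _
    rw [hitems]; simp
  have hgetD : ∀ p ∈ votes, (pvScoresAimes votes).getD p.1 0 = pvScore votes p.1 := by
    intro p hp
    refine PySem.Dict.getD_of_get?_eq_some _ _ (PySem.Dict.get?_of_mem_items _ ?_ ?_)
    · rw [hitems]; exact List.mem_map.mpr ⟨p, hp, rfl⟩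
    · rw [hkeys]; exact hnd
  set scores := votes.map (fun p => pvScore votes p.1) with hscdef
  have hscne : scores ≠ [] := by simpa [hscdef] using hne
  obtain ⟨m, hget, hmem, hub⟩ := pvLastSorted scores hscne
  -- B side facts
  have hcount : ∀ q, (votes.foldl (fun c p => p.2.foldl (fun c q => c.insert q (c.getD q 0 + 1)) c)
      (PySem.Dict.empty : PySem.Dict String Int)).getD q 0 = pvScore votes q := by
    intro q; rw [pvCountsFold]; simp [pvScore]
  have hfun : (fun (b : PySem.Dict Int (List String)) (p : String × List String) =>
        b.modify ((votes.foldl (fun c p => p.2.foldl (fun c q => c.insert q (c.getD q 0 + 1)) c)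
          (PySem.Dict.empty : PySem.Dict String Int)).getD p.1 0) [] (fun l => l ++ [p.1]))
      = (fun b p => b.modify (pvScore votes p.1) [] (fun l => l ++ [p.1])) := by
    funext b p; rw [hcount]
  set buckets := votes.foldl (fun b p => b.modify (pvScore votes p.1) [] (fun l => l ++ [p.1]))
      (PySem.Dict.empty : PySem.Dict Int (List String)) with hbdef
  have hbkeys : buckets.keys = PySem.Set.ofList scores := by
    rw [hbdef, PySem.Dict.keys_foldl_modify_key votes (fun p => pvScore votes p.1) [] (fun _ p => (fun l => l ++ [p.1]))]
    simp [PySem.Set.update, PySem.Set.ofList, hscdef, PySem.Dict.empty, PySem.Dict.keys]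
  have hbkne : buckets.keys ≠ [] := by
    rw [hbkeys]
    intro h
    rcases List.exists_mem_of_ne_nil scores hscne with ⟨y, hy⟩
    have := (PySem.Set.mem_ofList scores y).mpr hy
    simp [h] at this
  obtain ⟨m', hget', hmem', hub'⟩ := pvLastSorted buckets.keys (by exact hbkne)
  have hmm : m' = m := by
    apply le_antisymm
    · exact hub m' (by rw [hbkeys] at hmem'; exact (PySem.Set.mem_ofList _ _).mp hmem')
    · exact hub' m (by rw [hbkeys]; exact (PySem.Set.mem_ofList _ _).mpr hmem)
  have hbgetD : buckets.getD m [] = (votes.filter (fun p => pvScore votes p.1 == m)).map Prod.fst := by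
    have h1 : buckets = (votes.map (fun p => (pvScore votes p.1, p.1))).foldl
        (fun d q => d.modify q.1 [] (fun l => l ++ [q.2])) PySem.Dict.empty := by
      rw [hbdef, List.foldl_map]
    rw [h1, PySem.Dict.getD_foldl_modify_append]
    simp only [List.filter_map]
    simp [PySem.Dict.getD, PySem.Dict.get?, PySem.Dict.empty, Function.comp_def]
  -- now compute both sides
  show (match PySem.List.pyGet? (PySem.List.sorted
      ((pvScoresAimes votes).values.foldl (fun s v => s ++ [v]) []) (fun x => x) false) (-1) with
    | none => []
    | some top => (pvScoresAimes votes).keys.foldl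
        (fun g k => if (pvScoresAimes votes).getD k 0 == top then g ++ [k] else g) []) = _
  rw [PySem.List.foldl_append_singleton, hvals]
  simp only [List.nil_append]
  unfold gagnants_alt
  simp only [hfun]
  rw [← hbdef, hget, hget', hmm]
  dsimp only
  rw [hbgetD, hkeys]
  have hA := PySem.List.foldl_append_if
    (fun k => (pvScoresAimes votes).getD k 0 == m) id (votes.map Prod.fst) []
  simp only [List.map_id, List.nil_append, id_eq] at hA
  rw [hA, List.filter_map]
  refine congrArg (List.map Prod.fst) (List.filter_congr ?_)
  intro p hp
  simp [Function.comp, hgetD p hp]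

-- ===== VERDICT (by name: the statement is the Claim_ definition above) =====
theorem gagnants_spec : Claim_equal_gagnants := by
  intro votes _ hpre
  unfold Spec_gagnants
  exact pv_main votes hpre.1 hpre.2
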